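-- pv_equiv track=rewrite | github.com/batmen-lab/BioMANIA | src/gpt/analyze_window_API_dependency.py | deduplicate_tutorials
-- ===== SOURCE A (Python) =====
-- def deduplicate_tutorials(tutorials):
--     keys_to_remove = set()
--     keys = list(tutorials.keys())
--     for i, key_i in enumerate(keys):
--         for j, key_j in enumerate(keys):
--             if i != j and key_i in key_j:
--                 # Check if the APIs lists are the same
--                 if tutorials[key_i] == tutorials[key_j]:
--                     # Mark the more complex key for removal
--                     more_complex_key = key_i if 'dot' in key_i else key_j
--                     keys_to_remove.add(more_complex_key)
--     # Remove the marked keys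
--     for key in keys_to_remove:
--         del tutorials[key]
--     return tutorials
-- ===== SOURCE B (Python) =====
-- def deduplicate_tutorials(tutorials):
--     # Group keys into buckets of equal value-lists (list equality, not hashing),
--     # then compare keys only within a bucket. Returns a NEW dict; unlike the
--     # original it does not mutate its argument.
--     buckets = []  # list of (value, keys-with-that-value in insertion order)
--     for k, v in tutorials.items():
--         for b in buckets:
--             if b[0] == v:
--                 b[1].append(k)
--                 break
--         else:
--             buckets.append((v, [k]))
--     removal = set()
--     for _, ks in buckets:
--         for a in ks:
--             for c in ks:
--                 if a != c and a in c:
--                     removal.add(a if 'dot' in a else c)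
--     return {k: v for k, v in tutorials.items() if k not in removal}
-- ===== Notes on version B (the rewrite author's own statement) =====
-- stated objective: alternative
-- what changed: B first partitions the entries into buckets of keys sharing an equal value-list (equality-based bucketing), runs the pairwise substring check only inside each bucket, and then filters the dict by the removal set, instead of A's flat double scan over all key pairs with dict lookups inside; B returns a new dict and does not mutate its argument (A deletes keys in place; return values agree).
import Mathlib
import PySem

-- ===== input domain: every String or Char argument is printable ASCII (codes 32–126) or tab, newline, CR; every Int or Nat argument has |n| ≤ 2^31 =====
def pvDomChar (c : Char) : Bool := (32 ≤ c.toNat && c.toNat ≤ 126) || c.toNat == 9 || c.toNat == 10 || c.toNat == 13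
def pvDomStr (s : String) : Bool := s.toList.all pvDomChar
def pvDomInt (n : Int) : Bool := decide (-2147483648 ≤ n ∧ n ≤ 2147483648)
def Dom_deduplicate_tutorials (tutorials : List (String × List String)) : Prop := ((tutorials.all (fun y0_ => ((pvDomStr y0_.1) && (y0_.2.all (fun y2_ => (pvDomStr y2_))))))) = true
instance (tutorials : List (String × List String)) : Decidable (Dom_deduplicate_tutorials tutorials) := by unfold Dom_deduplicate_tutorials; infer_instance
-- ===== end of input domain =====

-- B groups the entries into buckets of keys sharing an equal value-list and runs the pairwise
-- substring check only inside each bucket, instead of A's flat double scan over all key pairs;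
-- equivalence is about the RETURN value (A deletes keys from its argument in place, B builds a
-- new list).


-- ===== PORT A =====
-- tutorials[key]: first-match lookup in the association list (Python dict __getitem__)

def pvGetVal (tutorials : List (String × List String)) (k : String) : Option (List String) :=
  (tutorials.find? (fun p => p.1 == k)).map (fun p => p.2)

def deduplicate_tutorials (tutorials : List (String × List String)) : List (String × List String) :=
  let keys := tutorials.map Prod.fst
  let keysToRemove : PySem.Set String :=
    (PySem.List.enumerate keys).foldl (fun s p =>
      (PySem.List.enumerate keys).foldl (fun s q =>
        if p.1 ≠ q.1 ∧ PySem.Str.isIn p.2 q.2 ∧ pvGetVal tutorials p.2 = pvGetVal tutorials q.2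
        then PySem.Set.add s (if PySem.Str.isIn "dot" p.2 then p.2 else q.2) else s) s)
      PySem.Set.empty
  keysToRemove.foldl (fun d k => d.filter (fun q => q.1 != k)) tutorials

-- ===== PORT B =====
def pvAddBucket : List (List String × List String) → String → List String → List (List String × List String)
  | [], k, v => [(v, [k])]
  | (bv, ks) :: rest, k, v =>
      if bv = v then (bv, ks ++ [k]) :: rest else (bv, ks) :: pvAddBucket rest k v

def pvBuckets (tutorials : List (String × List String)) : List (List String × List String) :=
  tutorials.foldl (fun bs p => pvAddBucket bs p.1 p.2) []

def deduplicate_tutorials_alt (tutorials : List (String × List String)) : List (String × List String) :=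
  let buckets := pvBuckets tutorials
  let removal : PySem.Set String :=
    buckets.foldl (fun s b =>
      b.2.foldl (fun s a =>
        b.2.foldl (fun s c =>
          if a ≠ c ∧ PySem.Str.isIn a c
          then PySem.Set.add s (if PySem.Str.isIn "dot" a then a else c) else s) s) s)
      PySem.Set.empty
  tutorials.filter (fun p => !(PySem.Set.contains removal p.1))

-- ===== PRECONDITION & SPEC =====
-- Pre_: the argument is a Python dict, so its keys are distinct (an association list with
-- duplicate keys does not represent any Python dict input to A).
def Pre_deduplicate_tutorials (tutorials : List (String × List String)) : Prop :=
  (tutorials.map Prod.fst).Nodup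
instance (tutorials : List (String × List String)) : Decidable (Pre_deduplicate_tutorials tutorials) := by unfold Pre_deduplicate_tutorials; infer_instance

def pvWitness_deduplicate_tutorials : (List (String × List String)) :=
  [("a", ["x"]), ("a.dot", ["x"]), ("b", ["y"])]

def Spec_deduplicate_tutorials (tutorials : List (String × List String)) (out : List (String × List String)) : Prop := out = deduplicate_tutorials_alt tutorials
instance (tutorials : List (String × List String)) (out : List (String × List String)) : Decidable (Spec_deduplicate_tutorials tutorials out) := by unfold Spec_deduplicate_tutorials; infer_instance

-- ===== CLAIM (what is proved, stated in full; the proofs are below) =====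
def Claim_equal_deduplicate_tutorials : Prop := ∀ (tutorials : List (String × List String)), Dom_deduplicate_tutorials tutorials → Pre_deduplicate_tutorials tutorials → Spec_deduplicate_tutorials tutorials (deduplicate_tutorials tutorials)

-- ===== LEMMAS AND PROOFS =====
-- the key-removal condition both programs compute, stated key-level
def pvRem (t : List (String × List String)) (x : String) : Prop :=
  ∃ ki vi kj vj, (ki, vi) ∈ t ∧ (kj, vj) ∈ t ∧ ki ≠ kj ∧
    PySem.Str.isIn ki kj = true ∧ vi = vj ∧
    x = (if PySem.Str.isIn "dot" ki then ki else kj)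

-- A's pair condition over enumerated keys equals pvRem (keys distinct)

lemma pvMemAddIf (s : PySem.Set String) (c : Prop) [Decidable c] (k x : String) :
    x ∈ (if c then PySem.Set.add s k else s) ↔ x ∈ s ∨ (c ∧ x = k) := by
  split_ifs with hc <;> simp [PySem.Set.mem_add, hc]

lemma pvMemFoldl {α : Type} (step : PySem.Set String → α → PySem.Set String)
    (P : α → String → Prop)
    (h : ∀ s a x, x ∈ step s a ↔ x ∈ s ∨ P a x)
    (l : List α) (s : PySem.Set String) (x : String) :
    x ∈ l.foldl step s ↔ x ∈ s ∨ ∃ a ∈ l, P a x := by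
  induction l generalizing s with
  | nil => simp
  | cons a l ih => simp only [List.foldl_cons, ih, h, List.exists_mem_cons_iff]; tauto

lemma pvGetVal_eq_some (t : List (String × List String))
    (h : (t.map Prod.fst).Nodup) {k : String} {v : List String} (hm : (k, v) ∈ t) :
    pvGetVal t k = some v := by
  induction t with
  | nil => cases hm
  | cons p t ih =>
    simp only [List.map_cons, List.nodup_cons] at h
    rcases List.mem_cons.mp hm with rfl | hmt
    · simp [pvGetVal, List.find?]
    · have hne : p.1 ≠ k := by
        intro he
        exact h.1 (he ▸ List.mem_map.mpr ⟨(k, v), hmt, rfl⟩)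
      simpa [pvGetVal, List.find?_cons, hne] using ih h.2 hmt

lemma pvAddBucket_eq (bs : List (List String × List String)) (k : String) (v : List String)
    (h : (bs.map Prod.fst).Nodup) :
    pvAddBucket bs k v
      = bs.map (fun b => if b.1 = v then (b.1, b.2 ++ [k]) else b)
        ++ (if v ∈ bs.map Prod.fst then [] else [(v, [k])]) := by
  induction bs with
  | nil => simp [pvAddBucket]
  | cons b rest ih =>
    obtain ⟨bv, ks⟩ := b
    simp only [List.map_cons, List.nodup_cons] at h
    by_cases hv : bv = v
    · subst hv
      have hrest : rest.map (fun b => if b.1 = bv then (b.1, b.2 ++ [k]) else b) = rest := by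
        rw [List.map_congr_left, List.map_id]
        intro b hb
        have : b.1 ≠ bv := fun he => h.1 (he ▸ List.mem_map.mpr ⟨b, hb, rfl⟩)
        simp [this]
      simp [pvAddBucket, hrest]
    · have hmem : (v ∈ bv :: rest.map Prod.fst) ↔ (v ∈ rest.map Prod.fst) := by
        simp only [List.mem_cons]
        exact ⟨fun hx => hx.resolve_left (fun he => hv he.symm), Or.inr⟩
      simp only [pvAddBucket, ih h.2, List.map_cons, if_neg hv, List.cons_append]
      by_cases hm : v ∈ rest.map Prod.fst <;> simp [hm, hmem]

lemma pvBucketsInv (t : List (String × List String)) :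
    ((pvBuckets t).map Prod.fst).Nodup ∧
    (∀ b ∈ pvBuckets t, ∀ a, a ∈ b.2 ↔ (a, b.1) ∈ t) ∧
    (∀ p ∈ t, ∃ b ∈ pvBuckets t, b.1 = p.2) := by
  induction t using List.reverseRecOn with
  | nil => simp [pvBuckets]
  | append_singleton l p ih =>
    obtain ⟨k, v⟩ := p
    obtain ⟨hnd, hmem, hcov⟩ := ih
    have hstep : pvBuckets (l ++ [(k, v)]) = pvAddBucket (pvBuckets l) k v := by
      simp [pvBuckets, List.foldl_append]
    rw [hstep, pvAddBucket_eq _ _ _ hnd]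
    set bs := pvBuckets l with hbs
    have hfst : ∀ b : List String × List String,
        ((if b.1 = v then (b.1, b.2 ++ [k]) else b) : List String × List String).1 = b.1 := by
      intro b; split <;> rfl
    have hmapfst : (bs.map (fun b => if b.1 = v then (b.1, b.2 ++ [k]) else b)).map Prod.fst
        = bs.map Prod.fst := by
      rw [List.map_map]; exact List.map_congr_left (fun b _ => hfst b)
    have hcov' : ∀ p ∈ l, ∃ b' ∈ bs.map (fun b => if b.1 = v then (b.1, b.2 ++ [k]) else b), b'.1 = p.2 := by
      intro p hp
      obtain ⟨b, hb, hbf⟩ := hcov p hp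
      exact ⟨_, List.mem_map.mpr ⟨b, hb, rfl⟩, (hfst b).trans hbf⟩
    have hmem' : ∀ b0 ∈ bs, ∀ a,
        a ∈ ((if b0.1 = v then (b0.1, b0.2 ++ [k]) else b0) : List String × List String).2
          ↔ (a, b0.1) ∈ l ∨ (b0.1 = v ∧ a = k) := by
      intro b0 hb0 a
      by_cases h0 : b0.1 = v
      · rw [if_pos h0]
        simp only [List.mem_append, List.mem_singleton, hmem b0 hb0 a, h0]
        tauto
      · rw [if_neg h0]
        rw [hmem b0 hb0 a]
        tauto
    by_cases hv : v ∈ bs.map Prod.fst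
    · rw [if_pos hv]
      refine ⟨by simpa [hmapfst] using hnd, ?_, ?_⟩
      · intro b hb a
        simp only [List.append_nil] at hb
        obtain ⟨b0, hb0, rfl⟩ := List.mem_map.mp hb
        rw [hmem' b0 hb0 a, hfst b0]
        simp only [List.mem_append, List.mem_singleton, Prod.mk.injEq]
        by_cases h0 : b0.1 = v <;> simp [h0]
      · intro p hp
        simp only [List.append_nil]
        rcases List.mem_append.mp hp with hp | hp
        · exact hcov' p hp
        · simp only [List.mem_singleton] at hp
          subst hp
          obtain ⟨b, hb, hbf⟩ := List.mem_map.mp hv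
          exact ⟨_, List.mem_map.mpr ⟨b, hb, rfl⟩, (hfst b).trans hbf⟩
    · rw [if_neg hv]
      have hknotin : ∀ a, (a, v) ∈ l → False := by
        intro a hal
        obtain ⟨b, hb, hbf⟩ := hcov (a, v) hal
        exact hv (List.mem_map.mpr ⟨b, hb, hbf⟩)
      refine ⟨?_, ?_, ?_⟩
      · rw [List.map_append, hmapfst]
        have h1 : List.map Prod.fst [((v : List String), ([k] : List String))] = [v] := rfl
        rw [h1]
        exact List.Nodup.append hnd (List.nodup_singleton _)
          (by intro x hx hx2; simp only [List.mem_singleton] at hx2; exact hv (hx2 ▸ hx))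
      · intro b hb a
        rcases List.mem_append.mp hb with hb | hb
        · obtain ⟨b0, hb0, rfl⟩ := List.mem_map.mp hb
          have h0 : b0.1 ≠ v := fun he => hv (List.mem_map.mpr ⟨b0, hb0, he⟩)
          rw [hmem' b0 hb0 a, hfst b0]
          simp only [List.mem_append, List.mem_singleton, Prod.mk.injEq]
          tauto
        · simp only [List.mem_singleton] at hb
          subst hb
          simp only [List.mem_singleton, List.mem_append, Prod.mk.injEq]
          have := hknotin a
          tauto
      · intro p hp
        rcases List.mem_append.mp hp with hp | hp
        · obtain ⟨b', hb', hbf⟩ := hcov' p hp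
          exact ⟨b', List.mem_append.mpr (Or.inl hb'), hbf⟩
        · simp only [List.mem_singleton] at hp
          subst hp
          exact ⟨(v, [k]), List.mem_append.mpr (Or.inr (by simp)), rfl⟩

lemma pvEnumPairs (t : List (String × List String))
    (h : (t.map Prod.fst).Nodup) (x : String) :
    (∃ p ∈ PySem.List.enumerate (t.map Prod.fst), ∃ q ∈ PySem.List.enumerate (t.map Prod.fst),
      (p.1 ≠ q.1 ∧ PySem.Str.isIn p.2 q.2 = true ∧ pvGetVal t p.2 = pvGetVal t q.2) ∧
      x = (if PySem.Str.isIn "dot" p.2 then p.2 else q.2))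
    ↔ pvRem t x := by
  constructor
  · rintro ⟨p, hp, q, hq, ⟨hij, hin, hval⟩, hx⟩
    obtain ⟨i, hi, rfl⟩ := (PySem.List.mem_enumerate_iff _ _ _).mp hp
    obtain ⟨j, hj, rfl⟩ := (PySem.List.mem_enumerate_iff _ _ _).mp hq
    simp only at hij hin hval hx
    obtain ⟨⟨ki, vi⟩, hkit, hki0⟩ := List.mem_map.mp (List.getElem_mem hi)
    obtain ⟨⟨kj, vj⟩, hkjt, hkj0⟩ := List.mem_map.mp (List.getElem_mem hj)
    have hki : (t.map Prod.fst)[i] = ki := hki0.symm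
    have hkj : (t.map Prod.fst)[j] = kj := hkj0.symm
    rw [hki, hkj] at hin hval hx
    have hgi := pvGetVal_eq_some t h hkit
    have hgj := pvGetVal_eq_some t h hkjt
    have hne : ki ≠ kj := by
      intro he
      apply hij
      have hieq : i = j := (List.Nodup.getElem_inj_iff h).mp (by rw [hki, hkj, he])
      simp [hieq]
    refine ⟨ki, vi, kj, vj, hkit, hkjt, hne, hin, ?_, hx⟩
    rw [hgi, hgj] at hval
    simpa using hval
  · rintro ⟨ki, vi, kj, vj, hkit, hkjt, hne, hin, hveq, hx⟩
    obtain ⟨i, hi, hki0⟩ := List.mem_iff_getElem.mp (List.mem_map.mpr ⟨(ki, vi), hkit, rfl⟩)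
    obtain ⟨j, hj, hkj0⟩ := List.mem_iff_getElem.mp (List.mem_map.mpr ⟨(kj, vj), hkjt, rfl⟩)
    have hki : (t.map Prod.fst)[i] = ki := hki0
    have hkj : (t.map Prod.fst)[j] = kj := hkj0
    refine ⟨((0 : Int) + i, (t.map Prod.fst)[i]), (PySem.List.mem_enumerate_iff _ _ _).mpr ⟨i, hi, rfl⟩,
      ((0 : Int) + j, (t.map Prod.fst)[j]), (PySem.List.mem_enumerate_iff _ _ _).mpr ⟨j, hj, rfl⟩, ⟨?_, ?_, ?_⟩, ?_⟩
    · show (0 : Int) + i ≠ (0 : Int) + j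
      intro he
      have hij : i = j := by omega
      subst hij
      exact hne (hki.symm.trans hkj)
    · show PySem.Str.isIn (t.map Prod.fst)[i] (t.map Prod.fst)[j] = true
      rw [hki, hkj]; exact hin
    · show pvGetVal t (t.map Prod.fst)[i] = pvGetVal t (t.map Prod.fst)[j]
      rw [hki, hkj, pvGetVal_eq_some t h hkit, pvGetVal_eq_some t h hkjt, hveq]
    · show x = if PySem.Str.isIn "dot" (t.map Prod.fst)[i] then (t.map Prod.fst)[i] else (t.map Prod.fst)[j]
      rw [hki, hkj]; exact hx

lemma pvBucketPairs (t : List (String × List String)) (x : String) :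
    (∃ b ∈ pvBuckets t, ∃ a ∈ b.2, ∃ c ∈ b.2,
      (a ≠ c ∧ PySem.Str.isIn a c = true) ∧ x = (if PySem.Str.isIn "dot" a then a else c))
    ↔ pvRem t x := by
  obtain ⟨-, hmem, hcov⟩ := pvBucketsInv t
  constructor
  · rintro ⟨b, hb, a, ha, c, hc, ⟨hne, hin⟩, hx⟩
    exact ⟨a, b.1, c, b.1, (hmem b hb a).mp ha, (hmem b hb c).mp hc, hne, hin, rfl, hx⟩
  · rintro ⟨ki, vi, kj, vj, hkit, hkjt, hne, hin, hveq, hx⟩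
    subst hveq
    obtain ⟨b, hb, hbf⟩ := hcov (ki, vi) hkit
    have hbf' : b.1 = vi := hbf
    refine ⟨b, hb, ki, ?_, kj, ?_, ⟨hne, hin⟩, hx⟩
    · exact (hmem b hb ki).mpr (by rw [hbf']; exact hkit)
    · exact (hmem b hb kj).mpr (by rw [hbf']; exact hkjt)

lemma pvFoldlFilter (L : List String) (d : List (String × List String)) :
    L.foldl (fun d k => d.filter (fun q => q.1 != k)) d
      = d.filter (fun q => !(L.contains q.1)) := by
  induction L generalizing d with
  | nil => simp
  | cons k L ih =>
    rw [List.foldl_cons, ih, List.filter_filter]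
    apply List.filter_congr
    intro q _
    simp only [List.contains_cons, Bool.not_or, Bool.and_comm, bne]

lemma pvMain (t : List (String × List String)) (hpre : (t.map Prod.fst).Nodup) :
    deduplicate_tutorials t = deduplicate_tutorials_alt t := by
  unfold deduplicate_tutorials deduplicate_tutorials_alt
  simp only
  rw [pvFoldlFilter]
  apply List.filter_congr
  intro q _
  have hA : ∀ x : String,
      (x ∈ (PySem.List.enumerate (t.map Prod.fst)).foldl (fun s p =>
        (PySem.List.enumerate (t.map Prod.fst)).foldl (fun s q =>
          if p.1 ≠ q.1 ∧ PySem.Str.isIn p.2 q.2 ∧ pvGetVal t p.2 = pvGetVal t q.2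
          then PySem.Set.add s (if PySem.Str.isIn "dot" p.2 then p.2 else q.2) else s) s)
        PySem.Set.empty) ↔ pvRem t x := by
    intro x
    rw [pvMemFoldl _ (fun p x => ∃ q ∈ PySem.List.enumerate (t.map Prod.fst),
        (p.1 ≠ q.1 ∧ PySem.Str.isIn p.2 q.2 = true ∧ pvGetVal t p.2 = pvGetVal t q.2) ∧
        x = (if PySem.Str.isIn "dot" p.2 then p.2 else q.2))
      (fun s p x => by
        rw [pvMemFoldl _ (fun q x => (p.1 ≠ q.1 ∧ PySem.Str.isIn p.2 q.2 = true ∧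
            pvGetVal t p.2 = pvGetVal t q.2) ∧ x = (if PySem.Str.isIn "dot" p.2 then p.2 else q.2))
          (fun s q x => by rw [pvMemAddIf])]
        )]
    rw [← pvEnumPairs t hpre x]
    simp [PySem.Set.empty]
  have hB : ∀ x : String,
      (x ∈ (pvBuckets t).foldl (fun s b =>
        b.2.foldl (fun s a =>
          b.2.foldl (fun s c =>
            if a ≠ c ∧ PySem.Str.isIn a c
            then PySem.Set.add s (if PySem.Str.isIn "dot" a then a else c) else s) s) s)
        PySem.Set.empty) ↔ pvRem t x := by
    intro x
    rw [pvMemFoldl _ (fun b x => ∃ a ∈ b.2, ∃ c ∈ b.2,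
        (a ≠ c ∧ PySem.Str.isIn a c = true) ∧ x = (if PySem.Str.isIn "dot" a then a else c))
      (fun s b x => by
        rw [pvMemFoldl _ (fun a x => ∃ c ∈ b.2, (a ≠ c ∧ PySem.Str.isIn a c = true) ∧
            x = (if PySem.Str.isIn "dot" a then a else c))
          (fun s a x => by
            rw [pvMemFoldl _ (fun c x => (a ≠ c ∧ PySem.Str.isIn a c = true) ∧
                x = (if PySem.Str.isIn "dot" a then a else c))
              (fun s c x => by rw [pvMemAddIf])]
            )]
        )]
    rw [← pvBucketPairs t x]
    simp [PySem.Set.empty]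
  have hiff : q.1 ∈ _ ↔ q.1 ∈ _ := (hA q.1).trans (hB q.1).symm
  congr 1
  rw [Bool.eq_iff_iff]
  simp only [PySem.Set.contains_eq_listContains, List.contains_iff_mem]
  exact hiff

-- ===== VERDICT (by name: the statement is the Claim_ definition above) =====
theorem deduplicate_tutorials_spec : Claim_equal_deduplicate_tutorials := by
  intro tutorials _ hpre
  unfold Spec_deduplicate_tutorials
  exact pvMain tutorials hpre
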